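-- pv_equiv track=rewrite | github.com/anysaaa/Geek2024 | Geek-python/py/program.py | decrypt_test
-- ===== SOURCE A (Python) =====
-- def decrypt_test(s):
--     R = 13  # 使用相同的偏移量
--     result = []
--     for i in s:
--         if 'A' <= i <= 'Z':
--             result.append(chr(((ord(i) - ord('A') - R + 26) % 26) + ord('A')))
--         elif 'a' <= i <= 'z':
--             result.append(chr(((ord(i) - ord('a') - R + 26) % 26) + ord('a')))
--         elif '0' <= i <= '9':
--             result.append(chr(((ord(i) - ord('0') - R + 10) % 10) + ord('0')))
--         else:
--             result.append(i)
--     return ''.join(result)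
-- ===== SOURCE B (Python) =====
-- _UP = 'ABCDEFGHIJKLMNOPQRSTUVWXYZ'
-- _LO = 'abcdefghijklmnopqrstuvwxyz'
-- _DG = '0123456789'
-- _TABLE = str.maketrans(_UP + _LO + _DG,
--                        _UP[13:] + _UP[:13] + _LO[13:] + _LO[:13] + _DG[7:] + _DG[:7])
--
-- def decrypt_test(s):
--     return s.translate(_TABLE)
-- ===== Notes on version B (the rewrite author's own statement) =====
-- stated objective: idiomatic
-- what changed: Replaces the per-character if/elif branching loop with a translation table built once (str.maketrans over the three rotated alphabets) and a single s.translate(table) call.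
import Mathlib
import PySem

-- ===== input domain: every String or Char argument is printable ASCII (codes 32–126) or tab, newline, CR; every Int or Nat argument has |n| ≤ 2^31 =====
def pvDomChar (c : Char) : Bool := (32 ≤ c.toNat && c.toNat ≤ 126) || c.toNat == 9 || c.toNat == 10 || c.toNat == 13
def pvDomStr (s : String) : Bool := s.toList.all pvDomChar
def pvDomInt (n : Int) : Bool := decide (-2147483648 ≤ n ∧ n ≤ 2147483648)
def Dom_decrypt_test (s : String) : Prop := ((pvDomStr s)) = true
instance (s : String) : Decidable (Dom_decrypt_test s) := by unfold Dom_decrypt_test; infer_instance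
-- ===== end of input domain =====

set_option maxRecDepth 10000

-- B replaces A's per-character if/elif branching loop by a translation table built once
-- (an association table over the three rotated alphabets) and a single lookup pass (idiomatic).

-- ===== PORT A =====
def decrypt_test (s : String) : String :=
  let R : Int := 13
  let result : List Char := s.toList.foldl (fun result i =>
    if 'A' ≤ i ∧ i ≤ 'Z' then
      result ++ [Char.ofNat ((PySem.Int.mod ((i.toNat : Int) - ('A'.toNat : Int) - R + 26) 26 + ('A'.toNat : Int)).toNat)]
    else if 'a' ≤ i ∧ i ≤ 'z' then
      result ++ [Char.ofNat ((PySem.Int.mod ((i.toNat : Int) - ('a'.toNat : Int) - R + 26) 26 + ('a'.toNat : Int)).toNat)]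
    else if '0' ≤ i ∧ i ≤ '9' then
      result ++ [Char.ofNat ((PySem.Int.mod ((i.toNat : Int) - ('0'.toNat : Int) - R + 10) 10 + ('0'.toNat : Int)).toNat)]
    else result ++ [i]) []
  String.mk result

-- ===== PORT B =====
def bUP : List Char := "ABCDEFGHIJKLMNOPQRSTUVWXYZ".toList
def bLO : List Char := "abcdefghijklmnopqrstuvwxyz".toList
def bDG : List Char := "0123456789".toList

-- str.maketrans(src, dst): table mapping src[i] ↦ dst[i]; _UP[13:] etc. are the nonneg slices (= drop/take).
def bTable : PySem.Dict Char Char :=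
  PySem.Dict.ofList (List.zip (bUP ++ bLO ++ bDG)
    (bUP.drop 13 ++ bUP.take 13 ++ bLO.drop 13 ++ bLO.take 13 ++ bDG.drop 7 ++ bDG.take 7))

-- s.translate(table): each character is replaced by its table image, left unchanged if absent.
def decrypt_test_alt (s : String) : String :=
  String.mk (s.toList.map (fun c => bTable.getD c c))

-- ===== PRECONDITION & SPEC =====
def Spec_decrypt_test (s : String) (out : String) : Prop := out = decrypt_test_alt s
instance (s : String) (out : String) : Decidable (Spec_decrypt_test s out) := by unfold Spec_decrypt_test; infer_instance

-- ===== CLAIM (what is proved, stated in full; the proofs are below) =====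
def Claim_equal_decrypt_test : Prop := ∀ (s : String), Dom_decrypt_test s → Spec_decrypt_test s (decrypt_test s)

-- ===== LEMMAS AND PROOFS =====
/-- A's per-character transformation, factored out of the loop body. -/
def aChar (i : Char) : Char :=
  if 'A' ≤ i ∧ i ≤ 'Z' then
    Char.ofNat ((PySem.Int.mod ((i.toNat : Int) - ('A'.toNat : Int) - 13 + 26) 26 + ('A'.toNat : Int)).toNat)
  else if 'a' ≤ i ∧ i ≤ 'z' then
    Char.ofNat ((PySem.Int.mod ((i.toNat : Int) - ('a'.toNat : Int) - 13 + 26) 26 + ('a'.toNat : Int)).toNat)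
  else if '0' ≤ i ∧ i ≤ '9' then
    Char.ofNat ((PySem.Int.mod ((i.toNat : Int) - ('0'.toNat : Int) - 13 + 10) 10 + ('0'.toNat : Int)).toNat)
  else i

theorem aChar_eq_table : (List.range 127).all
    (fun n => aChar (Char.ofNat n) == bTable.getD (Char.ofNat n) (Char.ofNat n)) = true := by
  decide

theorem aChar_eq_table' (c : Char) (h : pvDomChar c = true) :
    aChar c = bTable.getD c c := by
  have hle : c.toNat < 127 := by
    simp [pvDomChar] at h
    omega
  have := List.all_eq_true.mp aChar_eq_table c.toNat (List.mem_range.mpr hle)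
  simpa [Char.ofNat_toNat] using this

theorem decrypt_test_spec : Claim_equal_decrypt_test := by
  intro s hdom
  unfold Spec_decrypt_test decrypt_test decrypt_test_alt
  have hbody : (fun (result : List Char) (i : Char) =>
      if 'A' ≤ i ∧ i ≤ 'Z' then
        result ++ [Char.ofNat ((PySem.Int.mod ((i.toNat : Int) - ('A'.toNat : Int) - 13 + 26) 26 + ('A'.toNat : Int)).toNat)]
      else if 'a' ≤ i ∧ i ≤ 'z' then
        result ++ [Char.ofNat ((PySem.Int.mod ((i.toNat : Int) - ('a'.toNat : Int) - 13 + 26) 26 + ('a'.toNat : Int)).toNat)]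
      else if '0' ≤ i ∧ i ≤ '9' then
        result ++ [Char.ofNat ((PySem.Int.mod ((i.toNat : Int) - ('0'.toNat : Int) - 13 + 10) 10 + ('0'.toNat : Int)).toNat)]
      else result ++ [i]) = fun result i => result ++ [aChar i] := by
    funext result i
    simp only [aChar]
    split_ifs <;> rfl
  simp only [hbody, PySem.List.foldl_append_singleton_eq_map, List.nil_append]
  congr 1
  apply List.map_congr_left
  intro c hc
  apply aChar_eq_table'
  exact List.all_eq_true.mp hdom c hc

-- ===== VERDICT (by name: the statement is the Claim_ definition above) =====
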